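-- pv_equiv track=rewrite | github.com/Shinyila/clone-cognite-sdk-python | cognite/client/_api/datapoints.py | _find_initial_query_limits
-- ===== SOURCE A (Python) =====
-- from typing import (
--     TYPE_CHECKING,
--     Any,
--     Dict,
--     Iterable,
--     Iterator,
--     List,
--     Literal,
--     Optional,
--     Sequence,
--     Set,
--     Tuple,
--     Union,
--     cast,
-- )
--
-- def _find_initial_query_limits(limits: List[int], max_limit: int) -> List[int]:
--     actual_lims = [0] * len(limits)
--     not_done = set(range(len(limits)))
--     while not_done:
--         part = max_limit // len(not_done)
--         if not part:
--             # We still might not have not reached max_limit, but we can no longer distribute evenly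
--             break
--         rm_idx = set()
--         for i in not_done:
--             i_part = min(part, limits[i])  # A query of limit=10 does not need more of max_limit than 10
--             actual_lims[i] += i_part
--             max_limit -= i_part
--             if i_part == limits[i]:
--                 rm_idx.add(i)
--             else:
--                 limits[i] -= i_part
--         not_done -= rm_idx
--     return actual_lims
-- ===== SOURCE B (Python) =====
-- # Sorted water-fill: sort indices by limit once, remove satisfied ones as a
-- # prefix of the sorted order, tracking the uniform amount 'given' handed to every
-- # surviving index.  Same return value as A; unlike A it does NOT mutate `limits`.
-- def _find_initial_query_limits(limits, max_limit):
--     n = len(limits)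
--     actual = [0] * n
--     order = sorted(range(n), key=lambda i: limits[i])
--     ptr = 0
--     given = 0
--     ml = max_limit
--     while ptr < n:
--         surv = n - ptr
--         part = ml // surv
--         if part == 0:
--             break
--         thr = given + part
--         while ptr < n and limits[order[ptr]] <= thr:
--             i = order[ptr]
--             actual[i] = limits[i]
--             ml -= limits[i] - given
--             ptr += 1
--         ml -= part * (n - ptr)
--         given += part
--     for k in range(ptr, n):
--         actual[order[k]] = given
--     return actual
-- ===== Notes on version B (the rewrite author's own statement) =====
-- stated objective: alternative
-- what changed: A rescans every surviving index each round and mutates limits in place; B sorts the indices by limit once, removes all newly satisfied indices as a prefix of the sorted order and tracks a single uniform 'given' offset for the survivors instead of per-index remaining limits.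
import Mathlib
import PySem

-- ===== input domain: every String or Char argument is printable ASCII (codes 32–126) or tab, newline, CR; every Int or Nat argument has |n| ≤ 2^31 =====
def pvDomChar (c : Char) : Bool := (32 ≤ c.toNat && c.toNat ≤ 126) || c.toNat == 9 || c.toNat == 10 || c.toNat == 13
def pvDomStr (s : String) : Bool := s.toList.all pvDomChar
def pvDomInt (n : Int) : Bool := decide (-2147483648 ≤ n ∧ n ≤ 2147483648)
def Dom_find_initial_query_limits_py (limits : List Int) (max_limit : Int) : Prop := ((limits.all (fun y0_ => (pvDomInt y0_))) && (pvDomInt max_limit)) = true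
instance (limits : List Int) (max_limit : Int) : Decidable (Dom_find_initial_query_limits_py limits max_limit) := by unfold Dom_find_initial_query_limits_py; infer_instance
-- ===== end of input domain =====

-- B replaces A's per-round scan over all survivors by a one-off sort of the indices by limit,
-- removing satisfied indices as a prefix and tracking one uniform 'given' offset (objective: alternative).
-- A mutates its `limits` argument in place; B does not — the equivalence proved here is about the
-- RETURN value only.

-- ===== PORT A =====
structure pvStA where
  lims : List Int
  actual : List Int
  ml : Int
  rm : List Nat

-- body of `for i in not_done:` in A
def pvStepA (part : Int) (s : pvStA) (i : Nat) : pvStA :=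
  let li := s.lims.getD i 0
  let ipart := min part li
  let actual' := s.actual.set i (s.actual.getD i 0 + ipart)
  let ml' := s.ml - ipart
  if ipart = li then
    { lims := s.lims, actual := actual', ml := ml', rm := PySem.Set.add s.rm i }
  else
    { lims := s.lims.set i (li - ipart), actual := actual', ml := ml', rm := s.rm }

-- termination measure for A's while loop (and the identical one in B's loop)
def pvFlag (ml : Int) (n : Nat) : Nat := if 0 ≤ ml ∧ ml < n then 0 else 1

-- termination helper: rm only grows along the round fold
theorem pvStepA_rm_mono (part : Int) (s : pvStA) (i j : Nat) (h : j ∈ s.rm) :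
    j ∈ (pvStepA part s i).rm := by
  unfold pvStepA
  dsimp only
  split
  · simp only [PySem.Set.mem_add]; exact Or.inl h
  · exact h

theorem pvFoldA_rm_mono (part : Int) : ∀ (nd : List Nat) (s : pvStA) (j : Nat),
    j ∈ s.rm → j ∈ (nd.foldl (pvStepA part) s).rm := by
  intro nd
  induction nd with
  | nil => intro s j h; simpa using h
  | cons i t ih =>
      intro s j h
      simp only [List.foldl_cons]
      exact ih _ _ (pvStepA_rm_mono part s i j h)

-- termination helper: a round that removes nobody subtracts part for every survivor
theorem pvFoldA_ml_of_no_rm (part : Int) : ∀ (nd : List Nat) (s : pvStA),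
    (∀ i ∈ nd, i ∉ (nd.foldl (pvStepA part) s).rm) →
    (nd.foldl (pvStepA part) s).ml = s.ml - nd.length * part := by
  intro nd
  induction nd with
  | nil => intro s _; simp
  | cons i t ih =>
      intro s h
      simp only [List.foldl_cons]
      have hi : i ∉ (pvStepA part s i).rm := by
        intro hmem
        exact h i (by simp) (pvFoldA_rm_mono part t _ i hmem)
      have hstep : (pvStepA part s i).ml = s.ml - part ∧ (pvStepA part s i).rm = s.rm := by
        unfold pvStepA at hi ⊢
        dsimp only at hi ⊢
        split at hi
        · exact absurd (by simp [PySem.Set.mem_add]) hi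
        · rename_i hne
          have hmin : min part (s.lims.getD i 0) = part := by
            rcases min_choice part (s.lims.getD i 0) with h1 | h1
            · exact h1
            · exact absurd h1 hne
          rw [if_neg hne]
          exact ⟨by dsimp only; rw [hmin], rfl⟩
      have ht := ih (pvStepA part s i) (fun j hj => h j (by simp [hj]))
      rw [ht, hstep.1]
      push_cast [List.length_cons]
      ring

-- A's while loop (one round = pvRoundA, the `for i in not_done:` fold)
def pvRoundA (part : Int) (lims actual : List Int) (ml : Int) (nd : List Nat) : pvStA :=
  nd.foldl (pvStepA part) ⟨lims, actual, ml, []⟩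

-- not_done -= rm_idx
def pvNextND (rm : List Nat) (nd : List Nat) : List Nat :=
  nd.filter (fun i => !(List.contains rm i))

def pvLoopA (lims actual : List Int) (ml : Int) (notDone : List Nat) : List Int :=
  if hnd : notDone.isEmpty then actual
  else
    let part := PySem.Int.floordiv ml notDone.length
    if hp : part = 0 then actual
    else
      let s := pvRoundA part lims actual ml notDone
      pvLoopA s.lims s.actual s.ml (pvNextND s.rm notDone)
termination_by 2 * notDone.length + pvFlag ml notDone.length
decreasing_by
  have hne : notDone ≠ [] := by simpa [List.isEmpty_iff] using hnd
  have hn0 : 0 < notDone.length := List.length_pos_iff.mpr hne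
  set pt := PySem.Int.floordiv ml (notDone.length : Int) with hpt
  set s' := pvRoundA pt lims actual ml notDone with hs'
  set nd' := pvNextND s'.rm notDone with hnd2
  have hle : nd'.length ≤ notDone.length := by
    rw [hnd2, pvNextND]; exact List.length_filter_le _ _
  by_cases heq : nd'.length = notDone.length
  · -- nothing removed: the new ml is ml mod n, so pvFlag becomes 0 while it was 1
    have hall : ∀ i ∈ notDone, i ∉ (notDone.foldl (pvStepA pt) ⟨lims, actual, ml, []⟩).rm := by
      rw [hnd2, pvNextND] at heq
      have h5 := (List.length_filter_eq_length_iff).mp heq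
      intro i hi
      have h2 := h5 i hi
      rw [hs', pvRoundA] at h2
      simpa using h2
    have hml : s'.ml = ml - notDone.length * pt := by
      rw [hs', pvRoundA]; exact pvFoldA_ml_of_no_rm pt notDone _ hall
    have hmod : s'.ml = PySem.Int.mod ml notDone.length := by
      have h3 := PySem.Int.floordiv_mul_add_mod ml (notDone.length : Int)
      rw [hml, hpt]; linarith [h3]
    have hflag' : pvFlag s'.ml nd'.length = 0 := by
      have h1 : 0 ≤ s'.ml := by
        rw [hmod]; exact PySem.Int.mod_nonneg _ (by exact_mod_cast hn0)
      have h2 : s'.ml < nd'.length := by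
        rw [hmod, heq]; exact PySem.Int.mod_lt _ (by exact_mod_cast hn0)
      simp [pvFlag, h1, h2]
    have hflag : pvFlag ml notDone.length = 1 := by
      by_contra hc
      have h4 : 0 ≤ ml ∧ ml < notDone.length := by
        unfold pvFlag at hc; by_contra h; simp [h] at hc
      have h6 : pt = 0 := by
        rw [hpt, PySem.Int.floordiv_eq_iff_of_pos (by exact_mod_cast hn0)]
        constructor <;> [simpa using h4.1; simpa using h4.2]
      exact hp h6
    omega
  · have hlt : nd'.length < notDone.length := lt_of_le_of_ne hle heq
    have f1 : pvFlag s'.ml nd'.length ≤ 1 := by unfold pvFlag; split <;> omega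
    have f2 : pvFlag ml notDone.length ≤ 1 := by unfold pvFlag; split <;> omega
    omega

-- _find_initial_query_limits (A): actual_lims = [0]*n; not_done = set(range(n)); while-loop
def find_initial_query_limits_py (limits : List Int) (max_limit : Int) : List Int :=
  -- set(range(n)) iterated as the list of its (distinct) elements
  pvLoopA limits (List.replicate limits.length 0) max_limit (List.range limits.length)

-- ===== PORT B =====
-- B's while loop over the still-unsatisfied suffix `rest` of the sorted index order
-- the inner `while ptr < n and limits[order[ptr]] <= thr` prefix and the rest
def pvPre (orig : List Int) (thr : Int) (rest : List Nat) : List Nat :=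
  rest.takeWhile (fun i => orig.getD i 0 ≤ thr)
def pvPost (orig : List Int) (thr : Int) (rest : List Nat) : List Nat :=
  rest.dropWhile (fun i => orig.getD i 0 ≤ thr)
-- `for k in range(ptr, n): actual[order[k]] = given`
def pvFillB (given : Int) (rest : List Nat) (actual : List Int) : List Int :=
  rest.foldl (fun a k => a.set k given) actual

def pvLoopB (orig : List Int) (actual : List Int) (ml given : Int) (rest : List Nat) : List Int :=
  if hnd : rest.isEmpty then actual
  else
    let part := PySem.Int.floordiv ml rest.length
    if hp : part = 0 then
      -- the final `for k in range(ptr, n): actual[order[k]] = given` fill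
      pvFillB given rest actual
    else
      let thr := given + part
      let pre := pvPre orig thr rest
      let post := pvPost orig thr rest
      let actual' := pre.foldl (fun a i => a.set i (orig.getD i 0)) actual
      let ml' := ml - pre.foldl (fun acc i => acc + (orig.getD i 0 - given)) 0 - part * post.length
      pvLoopB orig actual' ml' (given + part) post
termination_by 2 * rest.length + pvFlag ml rest.length
decreasing_by
  have hne : rest ≠ [] := by simpa [List.isEmpty_iff] using hnd
  have hn0 : 0 < rest.length := List.length_pos_iff.mpr hne
  set pt := PySem.Int.floordiv ml (rest.length : Int) with hpt
  set pre' := pvPre orig (given + pt) rest with hpre'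
  set post' := pvPost orig (given + pt) rest with hpost'
  have hsplit : pre'.length + post'.length = rest.length := by
    rw [hpre', hpost', pvPre, pvPost, ← List.length_append, List.takeWhile_append_dropWhile]
  by_cases hpre0 : pre' = []
  · -- nothing removed: post' = rest and the new ml is ml mod n
    have hpostr : post' = rest := by
      rw [hpost', pvPost]
      rw [hpre', pvPre] at hpre0
      cases hcase : rest with
      | nil => simp
      | cons a t =>
          rw [hcase, List.takeWhile_cons] at hpre0
          rw [List.dropWhile_cons]
          split at hpre0
          · simp at hpre0
          · rename_i hcond
            rw [if_neg hcond]
    have hml' : ml - List.foldl (fun acc i => acc + (orig.getD i 0 - given)) 0 pre' - pt * post'.length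
        = PySem.Int.mod ml rest.length := by
      have h3 := PySem.Int.floordiv_mul_add_mod ml (rest.length : Int)
      rw [hpre0, hpostr]
      simp only [List.foldl_nil]
      rw [hpt]; linarith [h3]
    have hflag' : pvFlag (ml - List.foldl (fun acc i => acc + (orig.getD i 0 - given)) 0 pre' - pt * post'.length) post'.length = 0 := by
      have h1 : 0 ≤ PySem.Int.mod ml rest.length := PySem.Int.mod_nonneg _ (by exact_mod_cast hn0)
      have h2 : PySem.Int.mod ml rest.length < rest.length := PySem.Int.mod_lt _ (by exact_mod_cast hn0)
      rw [hml', hpostr]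
      simp [pvFlag, h1, h2]
    have hflag : pvFlag ml rest.length = 1 := by
      by_contra hc
      have h4 : 0 ≤ ml ∧ ml < rest.length := by
        unfold pvFlag at hc; by_contra h; simp [h] at hc
      have h6 : pt = 0 := by
        rw [hpt, PySem.Int.floordiv_eq_iff_of_pos (by exact_mod_cast hn0)]
        constructor <;> [simpa using h4.1; simpa using h4.2]
      exact hp h6
    omega
  · have hprelen : 0 < pre'.length := List.length_pos_iff.mpr hpre0
    have hlt : post'.length < rest.length := by omega
    have f1 : pvFlag (ml - List.foldl (fun acc i => acc + (orig.getD i 0 - given)) 0 pre' - pt * post'.length) post'.length ≤ 1 := by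
      unfold pvFlag; split <;> omega
    have f2 : pvFlag ml rest.length ≤ 1 := by unfold pvFlag; split <;> omega
    omega

-- _find_initial_query_limits (B): sort indices by limit, water-fill with a uniform offset
def find_initial_query_limits_py_alt (limits : List Int) (max_limit : Int) : List Int :=
  let n := limits.length
  let order := PySem.List.sorted (List.range n) (fun i => limits.getD i 0) false
  pvLoopB limits (List.replicate n 0) max_limit 0 order

-- ===== PRECONDITION & SPEC =====
def Spec_find_initial_query_limits_py (limits : List Int) (max_limit : Int) (out : List Int) : Prop := out = find_initial_query_limits_py_alt limits max_limit
instance (limits : List Int) (max_limit : Int) (out : List Int) : Decidable (Spec_find_initial_query_limits_py limits max_limit out) := by unfold Spec_find_initial_query_limits_py; infer_instance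

-- ===== CLAIM (what is proved, stated in full; the proofs are below) =====
def Claim_equal_find_initial_query_limits_py : Prop := ∀ (limits : List Int) (max_limit : Int), Dom_find_initial_query_limits_py limits max_limit → Spec_find_initial_query_limits_py limits max_limit (find_initial_query_limits_py limits max_limit)

-- ===== LEMMAS AND PROOFS =====

-- a Bool-negated decide unpacked
theorem pvNotDecide {p : Prop} [Decidable p] (h : (!decide p) = true) : ¬ p := by
  simpa using h

-- getD/set helpers
theorem pvGetD_set_self (l : List Int) (i : Nat) (v : Int) (h : i < l.length) :
    (l.set i v).getD i 0 = v := by simp [List.getD, h]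

theorem pvGetD_set_ne (l : List Int) (i j : Nat) (v : Int) (h : j ≠ i) :
    (l.set i v).getD j 0 = l.getD j 0 := by
  simp [List.getD, List.getElem?_set_ne (by omega : i ≠ j)]

-- unfolding lemmas for the two loops
theorem pvLoopA_nil (lims a : List Int) (ml : Int) : pvLoopA lims a ml [] = a := by
  rw [pvLoopA]; rfl

theorem pvLoopA_stop (lims a : List Int) (ml : Int) (nd : List Nat) (h : nd ≠ [])
    (h2 : PySem.Int.floordiv ml nd.length = 0) : pvLoopA lims a ml nd = a := by
  rw [pvLoopA]; simp [List.isEmpty_iff, h, h2]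

theorem pvLoopA_step (lims a : List Int) (ml : Int) (nd : List Nat) (h : nd ≠ [])
    (h2 : PySem.Int.floordiv ml nd.length ≠ 0) :
    pvLoopA lims a ml nd =
      pvLoopA (pvRoundA (PySem.Int.floordiv ml nd.length) lims a ml nd).lims
        (pvRoundA (PySem.Int.floordiv ml nd.length) lims a ml nd).actual
        (pvRoundA (PySem.Int.floordiv ml nd.length) lims a ml nd).ml
        (pvNextND (pvRoundA (PySem.Int.floordiv ml nd.length) lims a ml nd).rm nd) := by
  rw [pvLoopA]; simp [List.isEmpty_iff, h, h2]

theorem pvLoopB_nil (orig a : List Int) (ml given : Int) : pvLoopB orig a ml given [] = a := by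
  rw [pvLoopB]; rfl

theorem pvLoopB_stop (orig a : List Int) (ml given : Int) (rest : List Nat) (h : rest ≠ [])
    (h2 : PySem.Int.floordiv ml rest.length = 0) :
    pvLoopB orig a ml given rest = pvFillB given rest a := by
  rw [pvLoopB]; simp [List.isEmpty_iff, h, h2]

theorem pvLoopB_step (orig a : List Int) (ml given : Int) (rest : List Nat) (h : rest ≠ [])
    (h2 : PySem.Int.floordiv ml rest.length ≠ 0) :
    pvLoopB orig a ml given rest =
      pvLoopB orig
        ((pvPre orig (given + PySem.Int.floordiv ml rest.length) rest).foldl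
          (fun acc i => acc.set i (orig.getD i 0)) a)
        (ml - (pvPre orig (given + PySem.Int.floordiv ml rest.length) rest).foldl
            (fun acc i => acc + (orig.getD i 0 - given)) 0
          - PySem.Int.floordiv ml rest.length
            * (pvPost orig (given + PySem.Int.floordiv ml rest.length) rest).length)
        (given + PySem.Int.floordiv ml rest.length)
        (pvPost orig (given + PySem.Int.floordiv ml rest.length) rest) := by
  rw [pvLoopB]; simp [List.isEmpty_iff, h, h2]

-- writing a value at every index of a list of positions
theorem pvFoldSet_length (f : Nat → Int) : ∀ (l : List Nat) (a : List Int),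
    (l.foldl (fun acc i => acc.set i (f i)) a).length = a.length := by
  intro l
  induction l with
  | nil => intro a; rfl
  | cons i t ih =>
      intro a
      simp only [List.foldl_cons]
      rw [ih]
      exact List.length_set ..

theorem pvFoldSet_getD (f : Nat → Int) : ∀ (l : List Nat) (a : List Int),
    (∀ i ∈ l, i < a.length) → ∀ k,
    (l.foldl (fun acc i => acc.set i (f i)) a).getD k 0 = if k ∈ l then f k else a.getD k 0 := by
  intro l
  induction l with
  | nil => intro a _ k; simp
  | cons i t ih =>
      intro a hb k
      simp only [List.foldl_cons]
      rw [ih (a.set i (f i)) (by intro j hj; rw [List.length_set]; exact hb j (by simp [hj]))]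
      by_cases hk : k ∈ t
      · rw [if_pos hk, if_pos (by simp [hk])]
      · rw [if_neg hk]
        by_cases hki : k = i
        · subst hki
          rw [pvGetD_set_self _ _ _ (hb k (by simp)), if_pos (by simp)]
        · rw [pvGetD_set_ne _ _ _ _ hki, if_neg (by simp [hki, hk])]

-- foldl of additions is a sum
theorem pvFoldAdd (g : Nat → Int) : ∀ (l : List Nat) (x : Int),
    l.foldl (fun acc i => acc + g i) x = x + (l.map g).sum := by
  intro l
  induction l with
  | nil => intro x; simp
  | cons i t ih => intro x; simp only [List.foldl_cons, List.map_cons, List.sum_cons]; rw [ih]; ring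

theorem pvSumConst (g : Nat → Int) (c : Int) : ∀ (l : List Nat),
    (∀ i ∈ l, g i = c) → (l.map g).sum = c * l.length := by
  intro l
  induction l with
  | nil => intro _; simp
  | cons i t ih =>
      intro h
      simp only [List.map_cons, List.sum_cons, List.length_cons]
      rw [ih (fun j hj => h j (by simp [hj])), h i (by simp)]
      push_cast
      ring

-- on a key-sorted list, takeWhile/dropWhile of a key threshold are filters
theorem pvTakeDrop_sorted (key : Nat → Int) (c : Int) : ∀ (l : List Nat),
    l.Pairwise (fun a b => key a ≤ key b) →
    l.takeWhile (fun i => decide (key i ≤ c)) = l.filter (fun i => decide (key i ≤ c)) ∧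
    l.dropWhile (fun i => decide (key i ≤ c)) = l.filter (fun i => !decide (key i ≤ c)) := by
  intro l
  induction l with
  | nil => intro _; simp
  | cons a t ih =>
      intro h
      rw [List.pairwise_cons] at h
      obtain ⟨h1, h2⟩ := h
      obtain ⟨iht, ihd⟩ := ih h2
      by_cases hc : key a ≤ c
      · constructor
        · rw [List.takeWhile_cons, if_pos (by simpa using hc), List.filter_cons,
            if_pos (by simpa using hc), iht]
        · rw [List.dropWhile_cons, if_pos (by simpa using hc), List.filter_cons,
            if_neg (by simpa using hc), ihd]
      · have hall : ∀ b ∈ t, ¬ (key b ≤ c) := by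
          intro b hb
          have := h1 b hb
          omega
        constructor
        · rw [List.takeWhile_cons, if_neg (by simpa using hc)]
          rw [List.filter_cons, if_neg (by simpa using hc)]
          rw [List.filter_eq_nil_iff.mpr (by intro b hb; simpa using hall b hb)]
        · rw [List.dropWhile_cons, if_neg (by simpa using hc)]
          rw [List.filter_cons, if_pos (by simpa using hc)]
          rw [List.filter_eq_self.mpr (by intro b hb; simpa using hall b hb)]

-- characterization of one round of A (the `for i in not_done:` fold)
theorem pvRoundA_spec (part given : Int) (orig : List Int) : ∀ (nd : List Nat) (s0 : pvStA),
    nd.Nodup →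
    (∀ i ∈ nd, i < s0.lims.length) →
    (∀ i ∈ nd, i < s0.actual.length) →
    (∀ i ∈ nd, s0.lims.getD i 0 = orig.getD i 0 - given) →
    (∀ i ∈ nd, i ∉ s0.rm) →
    ((nd.foldl (pvStepA part) s0).rm
        = s0.rm ++ nd.filter (fun i => decide (orig.getD i 0 - given ≤ part)) ∧
     (nd.foldl (pvStepA part) s0).ml
        = s0.ml - (nd.map (fun i => min part (orig.getD i 0 - given))).sum ∧
     (nd.foldl (pvStepA part) s0).lims.length = s0.lims.length ∧
     (nd.foldl (pvStepA part) s0).actual.length = s0.actual.length ∧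
     (∀ k, (nd.foldl (pvStepA part) s0).actual.getD k 0
        = if k ∈ nd then s0.actual.getD k 0 + min part (orig.getD k 0 - given)
          else s0.actual.getD k 0) ∧
     (∀ i ∈ nd, ¬ (orig.getD i 0 - given ≤ part) →
        (nd.foldl (pvStepA part) s0).lims.getD i 0 = orig.getD i 0 - (given + part)) ∧
     (∀ j, j ∉ nd → (nd.foldl (pvStepA part) s0).lims.getD j 0 = s0.lims.getD j 0)) := by
  intro nd
  induction nd with
  | nil => intro s0 _ _ _ _ _; simp
  | cons i t ih =>
      intro s0 hnodup hbl hba hinv hrm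
      have hit : i ∉ t := (List.nodup_cons.mp hnodup).1
      have hli : s0.lims.getD i 0 = orig.getD i 0 - given := hinv i (by simp)
      have hil : i < s0.lims.length := hbl i (by simp)
      have hia : i < s0.actual.length := hba i (by simp)
      have hirm : i ∉ s0.rm := hrm i (by simp)
      -- the state after processing i
      set s1 := pvStepA part s0 i with hs1
      have hs1rm : s1.rm = if orig.getD i 0 - given ≤ part then s0.rm ++ [i] else s0.rm := by
        rw [hs1]
        unfold pvStepA
        dsimp only
        split
        · rename_i hcond
          rw [hli] at hcond
          have : orig.getD i 0 - given ≤ part := by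
            rcases min_choice part (s0.lims.getD i 0) with h | h <;> rw [hli] at h <;> omega
          rw [if_pos this]
          simp [PySem.Set.add, List.contains_iff_mem, hirm]
        · rename_i hcond
          rw [hli] at hcond
          have : ¬ (orig.getD i 0 - given ≤ part) := by
            intro hle
            exact hcond (by omega)
          rw [if_neg this]
      have hs1ml : s1.ml = s0.ml - min part (orig.getD i 0 - given) := by
        rw [hs1]; unfold pvStepA; dsimp only
        split <;> (dsimp only; rw [hli])
      have hs1al : s1.actual.length = s0.actual.length := by
        rw [hs1]; unfold pvStepA; dsimp only
        split <;> simp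
      have hs1ll : s1.lims.length = s0.lims.length := by
        rw [hs1]; unfold pvStepA; dsimp only
        split <;> simp
      have hs1act : ∀ k, s1.actual.getD k 0
          = if k = i then s0.actual.getD k 0 + min part (orig.getD k 0 - given)
            else s0.actual.getD k 0 := by
        intro k
        have hbody : s1.actual = s0.actual.set i (s0.actual.getD i 0 + min part (s0.lims.getD i 0)) := by
          rw [hs1]; unfold pvStepA; dsimp only; split <;> rfl
        rw [hbody]
        by_cases hk : k = i
        · subst hk
          rw [pvGetD_set_self _ _ _ hia, if_pos rfl, hli]
        · rw [pvGetD_set_ne _ _ _ _ hk, if_neg hk]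
      have hs1lims : ∀ j, j ≠ i → s1.lims.getD j 0 = s0.lims.getD j 0 := by
        intro j hj
        rw [hs1]; unfold pvStepA; dsimp only
        split
        · rfl
        · exact pvGetD_set_ne _ _ _ _ hj
      have hs1limi : ¬ (orig.getD i 0 - given ≤ part) →
          s1.lims.getD i 0 = orig.getD i 0 - (given + part) := by
        intro hgt
        have hcond : ¬ (min part (s0.lims.getD i 0) = s0.lims.getD i 0) := by
          rw [hli]
          intro h
          rcases min_choice part (orig.getD i 0 - given) with h2 | h2 <;> omega
        have hmin : min part (s0.lims.getD i 0) = part := by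
          rcases min_choice part (s0.lims.getD i 0) with h | h
          · exact h
          · exact absurd h hcond
        have hbody : s1.lims = s0.lims.set i (s0.lims.getD i 0 - min part (s0.lims.getD i 0)) := by
          rw [hs1]; unfold pvStepA; dsimp only
          rw [if_neg hcond]
        rw [hbody, pvGetD_set_self _ _ _ hil, hmin, hli]
        ring
      -- apply the induction hypothesis to the tail
      have ihres := ih s1 (List.nodup_cons.mp hnodup).2
        (by intro j hj; rw [hs1ll]; exact hbl j (by simp [hj]))
        (by intro j hj; rw [hs1al]; exact hba j (by simp [hj]))
        (by intro j hj
            rw [hs1lims j (by rintro rfl; exact hit hj)]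
            exact hinv j (by simp [hj]))
        (by intro j hj
            rw [hs1rm]
            have hjrm : j ∉ s0.rm := hrm j (by simp [hj])
            have hji : j ≠ i := by rintro rfl; exact hit hj
            split <;> simp [hjrm, hji])
      obtain ⟨irm, iml, ill, ial, iact, ilims, ilims2⟩ := ihres
      simp only [List.foldl_cons, ← hs1]
      refine ⟨?_, ?_, ?_, ?_, ?_, ?_, ?_⟩
      · rw [irm, hs1rm, List.filter_cons]
        by_cases hc : orig.getD i 0 - given ≤ part
        · rw [if_pos hc, if_pos (by simpa using hc)]
          simp
        · rw [if_neg hc, if_neg (by simpa using hc)]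
      · rw [iml, hs1ml]
        simp only [List.map_cons, List.sum_cons]
        ring
      · rw [ill, hs1ll]
      · rw [ial, hs1al]
      · intro k
        rw [iact k]
        by_cases hk : k ∈ t
        · rw [if_pos hk, if_pos (by simp [hk]), hs1act k,
            if_neg (by rintro rfl; exact hit hk)]
        · rw [if_neg hk, hs1act k]
          by_cases hki : k = i
          · rw [if_pos hki, if_pos (by simp [hki])]
          · rw [if_neg hki, if_neg (by simp [hki, hk])]
      · intro j hj hgt
        rcases List.mem_cons.mp hj with rfl | hjt
        · rw [ilims2 j hit]
          exact hs1limi hgt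
        · exact ilims j hjt hgt
      · intro j hj
        rw [ilims2 j (fun h => hj (by simp [h])), hs1lims j (fun h => hj (by simp [h]))]

-- two lists of equal length agreeing in every getD are equal
theorem pvListEq (aA aB : List Int) (h : aA.length = aB.length)
    (h2 : ∀ k, k < aA.length → aA.getD k 0 = aB.getD k 0) : aA = aB := by
  apply List.ext_getElem h
  intro k hk1 hk2
  have := h2 k hk1
  rwa [List.getD_eq_getElem aA 0 hk1, List.getD_eq_getElem aB 0 hk2] at this

-- the bisimulation between A's loop and B's loop
theorem pvMain (orig : List Int) : ∀ (N : Nat) (nd rest : List Nat) (lims aA aB : List Int) (ml given : Int),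
    2 * nd.length + pvFlag ml nd.length ≤ N →
    nd.Perm rest →
    nd.Nodup →
    (∀ i ∈ nd, i < orig.length) →
    rest.Pairwise (fun a b => orig.getD a 0 ≤ orig.getD b 0) →
    lims.length = orig.length →
    aA.length = orig.length →
    aB.length = orig.length →
    (∀ i ∈ nd, lims.getD i 0 = orig.getD i 0 - given) →
    (∀ k, k < orig.length → aA.getD k 0 = if k ∈ nd then given else aB.getD k 0) →
    pvLoopA lims aA ml nd = pvLoopB orig aB ml given rest := by
  intro N
  induction N with
  | zero =>
      intro nd rest lims aA aB ml given hN hperm hnodup hbound hsort hll hal hbl hinv hpt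
      have hnd : nd = [] := by
        cases nd with
        | nil => rfl
        | cons a t => simp [List.length_cons] at hN
      subst hnd
      have hr : rest = [] := (List.Perm.eq_nil hperm.symm)
      subst hr
      rw [pvLoopA_nil, pvLoopB_nil]
      apply pvListEq _ _ (by rw [hal, hbl])
      intro k hk
      have := hpt k (by rw [← hal]; exact hk)
      simpa using this
  | succ N ih =>
      intro nd rest lims aA aB ml given hN hperm hnodup hbound hsort hll hal hbl hinv hpt
      by_cases hnd : nd = []
      · subst hnd
        have hr : rest = [] := (List.Perm.eq_nil hperm.symm)
        subst hr
        rw [pvLoopA_nil, pvLoopB_nil]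
        apply pvListEq _ _ (by rw [hal, hbl])
        intro k hk
        have := hpt k (by rw [← hal]; exact hk)
        simpa using this
      · have hrest : rest ≠ [] := by
          intro h; subst h; exact hnd (List.Perm.eq_nil hperm)
        have hlen : rest.length = nd.length := hperm.length_eq.symm
        set part := PySem.Int.floordiv ml nd.length with hpart
        have hpartB : PySem.Int.floordiv ml rest.length = part := by rw [hlen]
        have hn0 : 0 < nd.length := List.length_pos_iff.mpr hnd
        by_cases hp : part = 0
        · -- both loops stop (A returns, B fills the survivors with `given`)
          rw [pvLoopA_stop lims aA ml nd hnd (by rw [← hpart]; exact hp)]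
          rw [pvLoopB_stop orig aB ml given rest hrest (by rw [hpartB]; exact hp)]
          have hfl : (pvFillB given rest aB).length = aB.length := by
            rw [pvFillB]; exact pvFoldSet_length _ rest aB
          apply pvListEq _ _ (by rw [hal, hfl, hbl])
          intro k hk
          have hfill : (pvFillB given rest aB).getD k 0 = if k ∈ rest then given else aB.getD k 0 := by
            rw [pvFillB]
            exact pvFoldSet_getD (fun _ => given) rest aB
              (by intro i hi; rw [hbl]; exact hbound i (hperm.mem_iff.mpr hi)) k
          rw [hfill]
          have h6 := hpt k (by rw [← hal]; exact hk)
          rw [h6]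
          by_cases hkm : k ∈ nd
          · rw [if_pos hkm, if_pos (hperm.mem_iff.mp hkm)]
          · rw [if_neg hkm, if_neg (fun h => hkm (hperm.mem_iff.mpr h))]
        · -- one round of each loop, then the induction hypothesis
          have hstepA := pvLoopA_step lims aA ml nd hnd (by rw [← hpart]; exact hp)
          have hstepB := pvLoopB_step orig aB ml given rest hrest (by rw [hpartB]; exact hp)
          rw [hpartB] at hstepB
          rw [← hpart] at hstepA
          rw [hstepA, hstepB]
          set pre := pvPre orig (given + part) rest with hpredef
          set post := pvPost orig (given + part) rest with hpostdef
          set s := pvRoundA part lims aA ml nd with hsdef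
          have hsfold : s = nd.foldl (pvStepA part) ⟨lims, aA, ml, []⟩ := by rw [hsdef, pvRoundA]
          have hround := pvRoundA_spec part given orig nd ⟨lims, aA, ml, []⟩ hnodup
            (by intro i hi; dsimp only; rw [hll]; exact hbound i hi)
            (by intro i hi; dsimp only; rw [hal]; exact hbound i hi)
            (by intro i hi; dsimp only; exact hinv i hi)
            (by intro i hi; dsimp only; exact List.not_mem_nil)
          rw [← hsfold] at hround
          obtain ⟨hrm, hml0, hlln0, haln0, hact0, hlims, -⟩ := hround
          rw [List.nil_append] at hrm
          -- restate with the structure projections reduced (definitional)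
          have hml : s.ml = ml - (nd.map (fun i => min part (orig.getD i 0 - given))).sum := hml0
          have hlln : s.lims.length = lims.length := hlln0
          have haln : s.actual.length = aA.length := haln0
          have hact : ∀ k, s.actual.getD k 0
              = if k ∈ nd then aA.getD k 0 + min part (orig.getD k 0 - given)
                else aA.getD k 0 := fun k => hact0 k
          have hpre2 : pre = rest.filter (fun i => decide (orig.getD i 0 ≤ given + part)) := by
            rw [hpredef, pvPre]
            exact (pvTakeDrop_sorted (fun i => orig.getD i 0) (given + part) rest hsort).1
          have hpost2 : post = rest.filter (fun i => !decide (orig.getD i 0 ≤ given + part)) := by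
            rw [hpostdef, pvPost]
            exact (pvTakeDrop_sorted (fun i => orig.getD i 0) (given + part) rest hsort).2
          have hnd' : pvNextND s.rm nd = nd.filter (fun i => !decide (orig.getD i 0 ≤ given + part)) := by
            rw [pvNextND]
            apply List.filter_congr
            intro i hi
            have hmem : i ∈ s.rm ↔ orig.getD i 0 - given ≤ part := by
              rw [hrm, List.mem_filter]
              constructor
              · rintro ⟨-, h⟩
                exact of_decide_eq_true h
              · intro h
                exact ⟨hi, decide_eq_true h⟩
            have hco : s.rm.contains i = decide (orig.getD i 0 ≤ given + part) := by
              by_cases hpi : orig.getD i 0 ≤ given + part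
              · rw [decide_eq_true hpi]
                exact List.contains_iff_mem.mpr (hmem.mpr (by omega))
              · rw [decide_eq_false hpi]
                have h7 : i ∉ s.rm := fun h => hpi (by have := hmem.mp h; omega)
                cases hcc : s.rm.contains i
                · rfl
                · exact absurd (List.contains_iff_mem.mp hcc) h7
            rw [hco]
          have hrestsplit : pre ++ post = rest := by
            rw [hpredef, hpostdef, pvPre, pvPost]
            exact List.takeWhile_append_dropWhile
          have hml' := hml
          have hsumA : (nd.map (fun i => min part (orig.getD i 0 - given))).sum
              = (pre.map (fun i => orig.getD i 0 - given)).sum + part * post.length := by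
            have h1 : (nd.map (fun i => min part (orig.getD i 0 - given))).sum
                = (rest.map (fun i => min part (orig.getD i 0 - given))).sum :=
              (hperm.map _).sum_eq
            rw [h1, ← hrestsplit, List.map_append, List.sum_append]
            congr 1
            · have : pre.map (fun i => min part (orig.getD i 0 - given))
                  = pre.map (fun i => orig.getD i 0 - given) := by
                apply List.map_congr_left
                intro i hi
                rw [hpre2, List.mem_filter] at hi
                have h9 : orig.getD i 0 ≤ given + part := of_decide_eq_true hi.2
                exact min_eq_right (by omega)
              rw [this]
            · apply pvSumConst
              intro i hi
              rw [hpost2, List.mem_filter] at hi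
              have h8 : ¬ (orig.getD i 0 ≤ given + part) :=
                pvNotDecide hi.2
              exact min_eq_left (by omega)
          have hmlB : ml - pre.foldl (fun acc i => acc + (orig.getD i 0 - given)) 0
              - part * post.length = s.ml := by
            rw [hml, pvFoldAdd, hsumA]
            ring
          rw [hmlB, hnd']
          set aB' := pre.foldl (fun acc i => acc.set i (orig.getD i 0)) aB with haB'
          have hpresub : ∀ i ∈ pre, i ∈ nd := by
            intro i hi
            rw [hpre2, List.mem_filter] at hi
            exact hperm.mem_iff.mpr hi.1
          have haB'len : aB'.length = orig.length := by
            rw [haB', pvFoldSet_length, hbl]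
          have haB'get : ∀ k, aB'.getD k 0 = if k ∈ pre then orig.getD k 0 else aB.getD k 0 := by
            intro k
            rw [haB']
            exact pvFoldSet_getD (fun i => orig.getD i 0) pre aB
              (by intro i hi; rw [hbl]; exact hbound i (hpresub i hi)) k
          refine ih _ _ _ _ _ _ _ ?_ ?_ ?_ ?_ ?_ ?_ ?_ ?_ ?_ ?_
          · -- the measure decreased
            by_cases hrem : (nd.filter (fun i => !decide (orig.getD i 0 ≤ given + part))).length
                = nd.length
            · have hallkeep : ∀ i ∈ nd, ¬ (orig.getD i 0 ≤ given + part) := by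
                intro i hi
                exact pvNotDecide (List.length_filter_eq_length_iff.mp hrem i hi)
              have hsml : s.ml = ml - nd.length * part := by
                rw [hml]
                have h9 : (nd.map (fun i => min part (orig.getD i 0 - given))).sum
                    = part * nd.length := by
                  apply pvSumConst
                  intro i hi
                  have h10 := hallkeep i hi
                  exact min_eq_left (by omega)
                rw [h9]
                ring
              have hmod : s.ml = PySem.Int.mod ml nd.length := by
                have h3 := PySem.Int.floordiv_mul_add_mod ml (nd.length : Int)
                rw [hsml, hpart]
                linarith
              have h1 : 0 ≤ s.ml := by
                rw [hmod]; exact PySem.Int.mod_nonneg _ (by exact_mod_cast hn0)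
              have h2 : s.ml < nd.length := by
                rw [hmod]; exact PySem.Int.mod_lt _ (by exact_mod_cast hn0)
              have hflag' : pvFlag s.ml
                  (nd.filter (fun i => !decide (orig.getD i 0 ≤ given + part))).length = 0 := by
                rw [hrem]
                simp [pvFlag, h1, h2]
              have hflag : pvFlag ml nd.length = 1 := by
                by_contra hc
                have h4 : 0 ≤ ml ∧ ml < nd.length := by
                  unfold pvFlag at hc; by_contra hx; simp [hx] at hc
                have h6 : part = 0 := by
                  rw [hpart, PySem.Int.floordiv_eq_iff_of_pos (by exact_mod_cast hn0)]
                  constructor <;> [simpa using h4.1; simpa using h4.2]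
                exact hp h6
              omega
            · have hle : (nd.filter (fun i => !decide (orig.getD i 0 ≤ given + part))).length
                  ≤ nd.length := List.length_filter_le _ _
              have f1 : pvFlag s.ml
                  (nd.filter (fun i => !decide (orig.getD i 0 ≤ given + part))).length ≤ 1 := by
                unfold pvFlag; split <;> omega
              have f2 : pvFlag ml nd.length ≤ 1 := by unfold pvFlag; split <;> omega
              omega
          · rw [hpost2]
            exact hperm.filter _
          · exact hnodup.filter _
          · intro i hi
            exact hbound i (List.mem_filter.mp hi).1
          · rw [hpost2]
            exact hsort.sublist List.filter_sublist
          · rw [hlln, hll]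
          · rw [haln, hal]
          · exact haB'len
          · intro i hi
            rw [List.mem_filter] at hi
            have h8 : ¬ (orig.getD i 0 ≤ given + part) :=
              pvNotDecide hi.2
            exact hlims i hi.1 (by omega)
          · intro k hk
            rw [hact k, haB'get k]
            by_cases hkm : k ∈ nd
            · have h6 := hpt k hk
              rw [if_pos hkm] at h6
              rw [if_pos hkm, h6]
              by_cases hpk : orig.getD k 0 ≤ given + part
              · have hknd' : k ∉ nd.filter (fun i => !decide (orig.getD i 0 ≤ given + part)) := by
                  intro h
                  exact pvNotDecide (List.mem_filter.mp h).2 hpk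
                have hkpre : k ∈ pre := by
                  rw [hpre2, List.mem_filter]
                  exact ⟨hperm.mem_iff.mp hkm, decide_eq_true hpk⟩
                rw [if_neg hknd', if_pos hkpre, min_eq_right (by omega : orig.getD k 0 - given ≤ part)]
                ring
              · have hknd' : k ∈ nd.filter (fun i => !decide (orig.getD i 0 ≤ given + part)) := by
                  rw [List.mem_filter]
                  refine ⟨hkm, ?_⟩
                  rw [decide_eq_false hpk]
                  rfl
                rw [if_pos hknd', min_eq_left (by omega : part ≤ orig.getD k 0 - given)]
            · have hknd' : k ∉ nd.filter (fun i => !decide (orig.getD i 0 ≤ given + part)) := by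
                intro h
                exact hkm (List.mem_filter.mp h).1
              have hkpre : k ∉ pre := fun h => hkm (hpresub k h)
              have h6 := hpt k hk
              rw [if_neg hkm] at h6
              rw [if_neg hkm, if_neg hknd', if_neg hkpre, h6]

-- ===== VERDICT (by name: the statement is the Claim_ definition above) =====
theorem find_initial_query_limits_py_spec : Claim_equal_find_initial_query_limits_py := by
  intro limits max_limit _
  unfold Spec_find_initial_query_limits_py
  unfold find_initial_query_limits_py find_initial_query_limits_py_alt
  dsimp only
  apply pvMain limits
    (2 * (List.range limits.length).length + pvFlag max_limit (List.range limits.length).length)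
    _ _ _ _ _ _ _ le_rfl
  · exact (PySem.List.sorted_perm _ _ _).symm
  · exact List.nodup_range
  · intro i hi
    simpa using List.mem_range.mp hi
  · exact PySem.List.sorted_pairwise _ _
  · rfl
  · simp
  · simp
  · intro i hi
    omega
  · intro k hk
    have : (List.replicate limits.length (0 : Int)).getD k 0 = 0 := by
      simp [List.getD]
    rw [this]
    split <;> rfl
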